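-- pv_equiv track=rewrite | github.com/MojtabaValizadeh/ltl-learning-on-gpus | code/dc.py | Until
-- ===== SOURCE A (Python) =====
-- def Until(bvList1, bvList2):
--     outList = []
--     for i in range(len(bvList1)):
--         bv1 = bvList1[i]
--         bv2 = bvList2[i]
--         bv2 |= bv1 & (bv2 >> 1)
--         bv1 &= bv1 >> 1
--         bv2 |= bv1 & (bv2 >> 2)
--         bv1 &= bv1 >> 2
--         bv2 |= bv1 & (bv2 >> 4)
--         bv1 &= bv1 >> 4
--         bv2 |= bv1 & (bv2 >> 8)
--         bv1 &= bv1 >> 8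
--         bv2 |= bv1 & (bv2 >> 16)
--         bv1 &= bv1 >> 16
--         bv2 |= bv1 & (bv2 >> 32)
--         outList.append(bv2)
--     return outList
-- ===== SOURCE B (Python) =====
-- def Until(bvList1, bvList2):
--     outList = []
--     for bv1, bv2 in zip(bvList1, bvList2):
--         for _ in range(63):
--             bv2 |= bv1 & (bv2 >> 1)
--         outList.append(bv2)
--     return outList
-- ===== Notes on version B (the rewrite author's own statement) =====
-- stated objective: simpler
-- what changed: A's hand-unrolled logarithmic doubling (shifts 1,2,4,8,16,32 with cumulative bv1 run-masks) is replaced by 63 repetitions of the single propagation step bv2 |= bv1 & (bv2 >> 1) with bv1 fixed, iterating over zip(bvList1, bvList2) instead of indices.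
import Mathlib
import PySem

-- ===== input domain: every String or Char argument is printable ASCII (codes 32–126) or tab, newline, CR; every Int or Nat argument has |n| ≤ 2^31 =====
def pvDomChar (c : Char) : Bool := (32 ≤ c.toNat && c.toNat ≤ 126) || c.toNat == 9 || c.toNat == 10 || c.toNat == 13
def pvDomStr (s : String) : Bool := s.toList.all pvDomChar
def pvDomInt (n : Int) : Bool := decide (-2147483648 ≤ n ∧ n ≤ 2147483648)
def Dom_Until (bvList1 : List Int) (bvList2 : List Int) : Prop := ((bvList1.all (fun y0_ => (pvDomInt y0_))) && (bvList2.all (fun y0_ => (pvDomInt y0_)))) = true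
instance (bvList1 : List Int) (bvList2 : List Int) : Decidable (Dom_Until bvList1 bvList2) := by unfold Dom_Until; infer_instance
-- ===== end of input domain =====

-- B replaces A's hand-unrolled logarithmic doubling (shifts 1,2,4,…,32 with bv1-masks) by 63
-- repetitions of the single propagation step bv2 |= bv1 & (bv2 >> 1) over zipped pairs: simpler, same results.

-- ===== PORT A =====
-- loop body of A, transliterated statement for statement
def untilStepA (bv1 : Int) (bv2 : Int) : Int :=
  let bv2 := Int.lor bv2 (Int.land bv1 (bv2 >>> (1:Nat)))
  let bv1 := Int.land bv1 (bv1 >>> (1:Nat))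
  let bv2 := Int.lor bv2 (Int.land bv1 (bv2 >>> (2:Nat)))
  let bv1 := Int.land bv1 (bv1 >>> (2:Nat))
  let bv2 := Int.lor bv2 (Int.land bv1 (bv2 >>> (4:Nat)))
  let bv1 := Int.land bv1 (bv1 >>> (4:Nat))
  let bv2 := Int.lor bv2 (Int.land bv1 (bv2 >>> (8:Nat)))
  let bv1 := Int.land bv1 (bv1 >>> (8:Nat))
  let bv2 := Int.lor bv2 (Int.land bv1 (bv2 >>> (16:Nat)))
  let bv1 := Int.land bv1 (bv1 >>> (16:Nat))
  let bv2 := Int.lor bv2 (Int.land bv1 (bv2 >>> (32:Nat)))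
  bv2

def Until (bvList1 : List Int) (bvList2 : List Int) : List Int :=
  (List.range bvList1.length).foldl
    (fun outList i =>
      let bv1 := (PySem.List.pyGet? bvList1 (Int.ofNat i)).getD 0
      let bv2 := (PySem.List.pyGet? bvList2 (Int.ofNat i)).getD 0
      outList ++ [untilStepA bv1 bv2])
    []

-- ===== PORT B =====
-- 63 repetitions of the single-distance propagation step, bv1 fixed
def untilStepB (bv1 : Int) (bv2 : Int) : Int :=
  (List.range 63).foldl (fun bv2 _ => Int.lor bv2 (Int.land bv1 (bv2 >>> (1:Nat)))) bv2

def Until_alt (bvList1 : List Int) (bvList2 : List Int) : List Int :=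
  (bvList1.zip bvList2).map (fun p => untilStepB p.1 p.2)

-- ===== PRECONDITION & SPEC =====
-- A indexes bvList2 by every i < len(bvList1): it raises IndexError when bvList2 is shorter.
def Pre_Until (bvList1 : List Int) (bvList2 : List Int) : Prop :=
  bvList1.length ≤ bvList2.length
instance (bvList1 : List Int) (bvList2 : List Int) : Decidable (Pre_Until bvList1 bvList2) := by unfold Pre_Until; infer_instance
def pvWitness_Until : List Int × List Int := ([1, 6], [4, 2])

def Spec_Until (bvList1 : List Int) (bvList2 : List Int) (out : List Int) : Prop := out = Until_alt bvList1 bvList2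
instance (bvList1 : List Int) (bvList2 : List Int) (out : List Int) : Decidable (Spec_Until bvList1 bvList2 out) := by unfold Spec_Until; infer_instance

-- ===== CLAIM (what is proved, stated in full; the proofs are below) =====
def Claim_equal_Until : Prop := ∀ (bvList1 : List Int) (bvList2 : List Int), Dom_Until bvList1 bvList2 → Pre_Until bvList1 bvList2 → Spec_Until bvList1 bvList2 (Until bvList1 bvList2)

-- ===== LEMMAS AND PROOFS =====

-- testBit basics for Int
theorem tb_shiftRight (m : Int) (k i : Nat) : (m >>> k).testBit i = m.testBit (k + i) := by
  cases m with
  | ofNat n =>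
      show Int.testBit (Int.ofNat (n >>> k)) i = Int.testBit (Int.ofNat n) (k + i)
      exact Nat.testBit_shiftRight n
  | negSucc n =>
      show Int.testBit (Int.negSucc (n >>> k)) i = Int.testBit (Int.negSucc n) (k + i)
      exact congrArg Bool.not (Nat.testBit_shiftRight n)

theorem int_eq_of_testBit_eq {m n : Int} (h : ∀ i, m.testBit i = n.testBit i) : m = n := by
  cases m with
  | ofNat a =>
    cases n with
    | ofNat b =>
      exact congrArg Int.ofNat (Nat.eq_of_testBit_eq fun i => h i)
    | negSucc b =>
      exfalso
      have hi := h (a + b + 1)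
      have ha : Nat.testBit a (a + b + 1) = false :=
        Nat.testBit_lt_two_pow (lt_of_lt_of_le Nat.lt_two_pow_self (Nat.pow_le_pow_right (by omega) (by omega)))
      have hb : Nat.testBit b (a + b + 1) = false :=
        Nat.testBit_lt_two_pow (lt_of_lt_of_le Nat.lt_two_pow_self (Nat.pow_le_pow_right (by omega) (by omega)))
      rw [show Int.testBit (Int.ofNat a) (a + b + 1) = Nat.testBit a (a + b + 1) from rfl,
          show Int.testBit (Int.negSucc b) (a + b + 1) = !Nat.testBit b (a + b + 1) from rfl,
          ha, hb] at hi
      exact Bool.false_ne_true hi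
  | negSucc a =>
    cases n with
    | ofNat b =>
      exfalso
      have hi := h (a + b + 1)
      have ha : Nat.testBit a (a + b + 1) = false :=
        Nat.testBit_lt_two_pow (lt_of_lt_of_le Nat.lt_two_pow_self (Nat.pow_le_pow_right (by omega) (by omega)))
      have hb : Nat.testBit b (a + b + 1) = false :=
        Nat.testBit_lt_two_pow (lt_of_lt_of_le Nat.lt_two_pow_self (Nat.pow_le_pow_right (by omega) (by omega)))
      rw [show Int.testBit (Int.negSucc a) (a + b + 1) = !Nat.testBit a (a + b + 1) from rfl,
          show Int.testBit (Int.ofNat b) (a + b + 1) = Nat.testBit b (a + b + 1) from rfl,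
          ha, hb] at hi
      exact Bool.false_ne_true hi.symm
    | negSucc b =>
      have : a = b := Nat.eq_of_testBit_eq fun i => by
        have hi := h i
        rw [show Int.testBit (Int.negSucc a) i = !Nat.testBit a i from rfl,
            show Int.testBit (Int.negSucc b) i = !Nat.testBit b i from rfl] at hi
        exact Bool.not_inj hi
      exact congrArg Int.negSucc this

-- `runTo bv1 bv2 t i` : some k < t has a bv1-run of length k at i followed by a bv2 bit
def runTo (bv1 bv2 : Int) (t i : Nat) : Prop :=
  ∃ k, k < t ∧ (∀ j, j < k → bv1.testBit (i + j) = true) ∧ bv2.testBit (i + k) = true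

-- characterisations of the two loop states
def SChar (bv1 bv2 : Int) (t : Nat) (y : Int) : Prop :=
  ∀ i, y.testBit i = true ↔ runTo bv1 bv2 t i
def XChar (bv1 : Int) (m : Nat) (x : Int) : Prop :=
  ∀ i, x.testBit i = true ↔ ∀ r, r < m → bv1.testBit (i + r) = true

theorem schar_base (bv1 bv2 : Int) : SChar bv1 bv2 1 bv2 := by
  intro i
  constructor
  · intro hb
    exact ⟨0, by omega, fun j hj => absurd hj (by omega), by simpa using hb⟩
  · rintro ⟨k, hk, -, hb⟩
    have : k = 0 := by omega
    subst this
    simpa using hb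

theorem xchar_base (bv1 : Int) : XChar bv1 1 bv1 := by
  intro i
  constructor
  · intro hb r hr
    have : r = 0 := by omega
    subst this
    simpa using hb
  · intro hr
    simpa using hr 0 (by omega)

theorem xchar_double {bv1 x : Int} {m : Nat} (hx : XChar bv1 m x) :
    XChar bv1 (2 * m) (Int.land x (x >>> m)) := by
  intro i
  rw [Int.testBit_land, tb_shiftRight, Bool.and_eq_true, hx i, hx (m + i)]
  constructor
  · rintro ⟨h1, h2⟩ r hr
    by_cases hc : r < m
    · exact h1 r hc
    · have := h2 (r - m) (by omega)
      simpa [show m + i + (r - m) = i + r by omega] using this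
  · intro hr
    refine ⟨fun r hrm => hr r (by omega), fun r hrm => ?_⟩
    have := hr (m + r) (by omega)
    simpa [show i + (m + r) = m + i + r by omega] using this

theorem schar_stage {bv1 bv2 x y : Int} {m : Nat} (hx : XChar bv1 m x) (hy : SChar bv1 bv2 m y) :
    SChar bv1 bv2 (2 * m) (Int.lor y (Int.land x (y >>> m))) := by
  intro i
  rw [Int.testBit_lor, Int.testBit_land, tb_shiftRight, Bool.or_eq_true, Bool.and_eq_true,
      hy i, hx i, hy (m + i)]
  constructor
  · rintro (⟨k, hk, hrun, hb⟩ | ⟨hx1, k, hk, hrun, hb⟩)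
    · exact ⟨k, by omega, hrun, hb⟩
    · refine ⟨m + k, by omega, fun j hj => ?_, by simpa [show i + (m + k) = m + i + k by omega] using hb⟩
      by_cases hc : j < m
      · exact hx1 j hc
      · have := hrun (j - m) (by omega)
        simpa [show m + i + (j - m) = i + j by omega] using this
  · rintro ⟨k, hk, hrun, hb⟩
    by_cases hc : k < m
    · exact Or.inl ⟨k, hc, hrun, hb⟩
    · refine Or.inr ⟨fun r hr => hrun r (by omega), k - m, by omega, fun j hj => ?_, ?_⟩
      · have := hrun (m + j) (by omega)
        simpa [show i + (m + j) = m + i + j by omega] using this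
      · simpa [show i + k = m + i + (k - m) by omega] using hb

theorem schar_step {bv1 bv2 y : Int} {t : Nat} (ht : 1 ≤ t) (hy : SChar bv1 bv2 t y) :
    SChar bv1 bv2 (t + 1) (Int.lor y (Int.land bv1 (y >>> (1:Nat)))) := by
  intro i
  rw [Int.testBit_lor, Int.testBit_land, tb_shiftRight, Bool.or_eq_true, Bool.and_eq_true,
      hy i, hy (1 + i)]
  constructor
  · rintro (⟨k, hk, hrun, hb⟩ | ⟨hx1, k, hk, hrun, hb⟩)
    · exact ⟨k, by omega, hrun, hb⟩
    · refine ⟨k + 1, by omega, fun j hj => ?_, by simpa [show i + (k + 1) = 1 + i + k by omega] using hb⟩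
      by_cases hc : j = 0
      · simpa [hc] using hx1
      · have := hrun (j - 1) (by omega)
        simpa [show 1 + i + (j - 1) = i + j by omega] using this
  · rintro ⟨k, hk, hrun, hb⟩
    by_cases hc : k < t
    · exact Or.inl ⟨k, hc, hrun, hb⟩
    · have hk1 : 1 ≤ k := by omega
      refine Or.inr ⟨by simpa using hrun 0 (by omega), k - 1, by omega, fun j hj => ?_, ?_⟩
      · have := hrun (j + 1) (by omega)
        simpa [show i + (j + 1) = 1 + i + j by omega] using this
      · simpa [show i + k = 1 + i + (k - 1) by omega] using hb

theorem stepA_char (bv1 bv2 : Int) : SChar bv1 bv2 64 (untilStepA bv1 bv2) := by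
  have x1 := xchar_base bv1
  have s1 := schar_base bv1 bv2
  have s2 := schar_stage x1 s1
  have x2 := xchar_double x1
  have s4 := schar_stage x2 s2
  have x4 := xchar_double x2
  have s8 := schar_stage x4 s4
  have x8 := xchar_double x4
  have s16 := schar_stage x8 s8
  have x16 := xchar_double x8
  have s32 := schar_stage x16 s16
  have x32 := xchar_double x16
  have s64 := schar_stage x32 s32
  exact s64

theorem schar_iter (bv1 bv2 : Int) (n : Nat) : ∀ (t : Nat) (y : Int), 1 ≤ t → SChar bv1 bv2 t y →
    SChar bv1 bv2 (t + n)
      ((List.range n).foldl (fun b2 _ => Int.lor b2 (Int.land bv1 (b2 >>> (1:Nat)))) y) := by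
  induction n with
  | zero => intro t y _ hy; simpa using hy
  | succ n ih =>
    intro t y ht hy
    rw [List.range_succ, List.foldl_append]
    have := schar_step (by omega) (ih t y ht hy)
    simpa [show t + n + 1 = t + (n + 1) by omega] using this

theorem stepB_char (bv1 bv2 : Int) : SChar bv1 bv2 64 (untilStepB bv1 bv2) := by
  have := schar_iter bv1 bv2 63 1 bv2 (by omega) (schar_base bv1 bv2)
  simpa [untilStepB] using this

theorem step_eq (bv1 bv2 : Int) : untilStepA bv1 bv2 = untilStepB bv1 bv2 := by
  have hA := stepA_char bv1 bv2
  have hB := stepB_char bv1 bv2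
  apply int_eq_of_testBit_eq
  intro i
  have h1 := hA i
  have h2 := hB i
  rw [Bool.eq_iff_iff, h1, h2]

-- the foldl-append loop of A builds the mapped range
theorem foldl_append_map {α β : Type} (f : α → β) (l : List α) (acc : List β) :
    l.foldl (fun out a => out ++ [f a]) acc = acc ++ l.map f := by
  induction l generalizing acc with
  | nil => simp
  | cons a l ih => simp [ih]

-- ===== VERDICT (by name: the statement is the Claim_ definition above) =====
theorem Until_spec : Claim_equal_Until := by
  intro bvList1 bvList2 _ hpre
  unfold Pre_Until at hpre
  unfold Spec_Until Until Until_alt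
  rw [foldl_append_map]
  apply List.ext_getElem
  · simpa using hpre
  · intro i h1 h2
    have hi1 : i < bvList1.length := by simpa using h1
    have hi2 : i < bvList2.length := by simp at h2; omega
    simp only [List.nil_append, List.getElem_map, List.getElem_range, List.getElem_zip]
    rw [step_eq]
    simp [hi1, hi2]
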